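-- pv_equiv track=rewrite | github.com/BlackChesire/PycharmProjects | Shimon_Labs/dicOfDiv.py | dicOfDiv
-- ===== SOURCE A (Python) =====
-- def dicOfDiv(ls):
--     sum=0
--     count=0
--     dic={}
--     for i in ls:
--         lst=[]
--         for j in range(2,i//2+1):
--             if i%j==0:
--                 sum+=j
--                 count+=1
--                 lst.append(j)
--         dic[i]=lst
--     return dic,sum,count
-- ===== SOURCE B (Python) =====
-- def dicOfDiv(ls):
--     dic = {}
--     total = 0
--     count = 0
--     for i in ls:
--         small = []
--         large = []
--         d = 2
--         while d * d <= i: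
--             if i % d == 0:
--                 small.append(d)
--                 q = i // d
--                 if q != d:
--                     large.append(q)
--             d += 1
--         lst = small + large[::-1]
--         dic[i] = lst
--         total += sum(lst)
--         count += len(lst)
--     return dic, total, count
-- ===== Notes on version B (the rewrite author's own statement) =====
-- stated objective: faster
-- what changed: Per element, A scans every j in range(2, i//2+1); B trial-divides only up to sqrt(i), collecting each small divisor and its cofactor and joining small + reversed(cofactors) to get the same ascending list, and derives sum/count from the list.
import Mathlib
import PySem

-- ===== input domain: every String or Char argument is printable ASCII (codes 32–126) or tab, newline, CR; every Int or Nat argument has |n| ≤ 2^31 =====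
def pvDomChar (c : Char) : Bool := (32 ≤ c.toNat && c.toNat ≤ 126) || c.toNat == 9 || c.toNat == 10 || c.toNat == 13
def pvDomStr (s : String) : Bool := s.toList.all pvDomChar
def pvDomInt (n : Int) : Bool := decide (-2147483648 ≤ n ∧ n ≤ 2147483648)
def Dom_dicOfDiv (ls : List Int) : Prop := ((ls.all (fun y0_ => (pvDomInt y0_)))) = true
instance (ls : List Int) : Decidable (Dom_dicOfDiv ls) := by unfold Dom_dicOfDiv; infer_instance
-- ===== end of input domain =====

-- B replaces A's O(i) scan of range(2, i//2+1) per element by trial division up to √i collecting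
-- divisor pairs (small ascending, cofactors appended then reversed), an asymptotically faster algorithm.

-- ===== PORT A =====
def dicOfDiv (ls : List Int) : (List (Int × List Int)) × Int × Int :=
  let st := ls.foldl (fun (st : Int × Int × PySem.Dict Int (List Int)) i =>
    let inner := (PySem.List.pyRange 2 (PySem.Int.floordiv i 2 + 1) 1).foldl
      (fun (acc : Int × Int × List Int) j =>
        if PySem.Int.mod i j == 0 then (acc.1 + j, acc.2.1 + 1, acc.2.2 ++ [j]) else acc)
      (st.1, st.2.1, [])
    (inner.1, inner.2.1, st.2.2.insert i inner.2.2)) (0, 0, PySem.Dict.empty)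
  (st.2.2.items, st.1, st.2.1)

-- ===== PORT B =====
-- termination measure fact for the while loop below (cited by name in decreasing_by)
theorem dicOfDivTrial_dec {i d : Int} (h : d * d ≤ i) :
    (i + 1 - (d + 1)).toNat < (i + 1 - d).toNat := by
  have hdd : d ≤ d * d := by nlinarith [sq_nonneg (d - 1)]
  omega

-- the while loop of Source B: d counts up while d*d ≤ i, collecting small divisors and their cofactors
def dicOfDivTrial (i : Int) (d : Int) (small large : List Int) : List Int × List Int :=
  if h : d * d ≤ i then
    if PySem.Int.mod i d == 0 then
      let q := PySem.Int.floordiv i d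
      if q ≠ d then dicOfDivTrial i (d + 1) (small ++ [d]) (large ++ [q])
      else dicOfDivTrial i (d + 1) (small ++ [d]) large
    else dicOfDivTrial i (d + 1) small large
  else (small, large)
termination_by (i + 1 - d).toNat
decreasing_by all_goals exact dicOfDivTrial_dec h

def dicOfDiv_alt (ls : List Int) : (List (Int × List Int)) × Int × Int :=
  let st := ls.foldl (fun (st : PySem.Dict Int (List Int) × Int × Int) i =>
    let p := dicOfDivTrial i 2 [] []
    let lst := p.1 ++ p.2.reverse
    (st.1.insert i lst, st.2.1 + lst.sum, st.2.2 + (lst.length : Int))) (PySem.Dict.empty, 0, 0)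
  (st.1.items, st.2.1, st.2.2)

-- ===== PRECONDITION & SPEC =====
def Spec_dicOfDiv (ls : List Int) (out : (List (Int × List Int)) × Int × Int) : Prop := out = dicOfDiv_alt ls
instance (ls : List Int) (out : (List (Int × List Int)) × Int × Int) : Decidable (Spec_dicOfDiv ls out) := by unfold Spec_dicOfDiv; infer_instance

-- ===== CLAIM (what is proved, stated in full; the proofs are below) =====
def Claim_equal_dicOfDiv : Prop := ∀ (ls : List Int), Dom_dicOfDiv ls → Spec_dicOfDiv ls (dicOfDiv ls)

-- ===== LEMMAS AND PROOFS =====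

-- the divisor list both programs attach to i
def divListA (i : Int) : List Int :=
  (PySem.List.pyRange 2 (PySem.Int.floordiv i 2 + 1) 1).filter (fun j => PySem.Int.mod i j == 0)

lemma innerA_eq (i : Int) (R : List Int) (s c : Int) (l : List Int) :
    R.foldl (fun (acc : Int × Int × List Int) j =>
        if PySem.Int.mod i j == 0 then (acc.1 + j, acc.2.1 + 1, acc.2.2 ++ [j]) else acc)
      (s, c, l)
    = (s + (R.filter (fun j => PySem.Int.mod i j == 0)).sum,
       c + (R.filter (fun j => PySem.Int.mod i j == 0)).length,
       l ++ R.filter (fun j => PySem.Int.mod i j == 0)) := by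
  induction R generalizing s c l with
  | nil => simp
  | cons x t ih =>
    by_cases hx : (PySem.Int.mod i x == 0) = true
    · rw [List.foldl_cons, if_pos hx, ih]
      simp only [List.filter_cons, hx, if_true, List.sum_cons, List.length_cons, Prod.mk.injEq]
      refine ⟨by ring, by push_cast; ring, by simp⟩
    · rw [List.foldl_cons, if_neg hx, ih]
      simp only [List.filter_cons, hx, Bool.false_eq_true, if_false]

lemma trial_fst_mem (i x : Int) : ∀ (d : Int) (small large : List Int), 2 ≤ d →
    (x ∈ (dicOfDivTrial i d small large).1 ↔
      x ∈ small ∨ (d ≤ x ∧ x * x ≤ i ∧ PySem.Int.mod i x = 0)) := by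
  intro d small large
  induction d, small, large using dicOfDivTrial.induct (i := i) with
  | case1 d small large hle hmod q hq ih =>
    intro hd
    have hm : PySem.Int.mod i d = 0 := by simpa using hmod
    rw [dicOfDivTrial]
    simp only [dif_pos hle, hmod, if_true]
    rw [if_pos hq, ih (by omega)]
    simp only [List.mem_append, List.mem_singleton]
    constructor
    · rintro ((h | rfl) | ⟨h1, h2, h3⟩)
      · exact Or.inl h
      · exact Or.inr ⟨le_refl _, hle, hm⟩
      · exact Or.inr ⟨by omega, h2, h3⟩
    · rintro (h | ⟨h1, h2, h3⟩)
      · exact Or.inl (Or.inl h)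
      · by_cases hxd : x = d
        · exact Or.inl (Or.inr hxd)
        · exact Or.inr ⟨by omega, h2, h3⟩
  | case2 d small large hle hmod q hq ih =>
    intro hd
    have hm : PySem.Int.mod i d = 0 := by simpa using hmod
    rw [dicOfDivTrial]
    simp only [dif_pos hle, hmod, if_true]
    rw [if_neg hq, ih (by omega)]
    simp only [List.mem_append, List.mem_singleton]
    constructor
    · rintro ((h | rfl) | ⟨h1, h2, h3⟩)
      · exact Or.inl h
      · exact Or.inr ⟨le_refl _, hle, hm⟩
      · exact Or.inr ⟨by omega, h2, h3⟩
    · rintro (h | ⟨h1, h2, h3⟩)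
      · exact Or.inl (Or.inl h)
      · by_cases hxd : x = d
        · exact Or.inl (Or.inr hxd)
        · exact Or.inr ⟨by omega, h2, h3⟩
  | case3 d small large hle hmod ih =>
    intro hd
    have hm : ¬ PySem.Int.mod i d = 0 := by simpa using hmod
    rw [dicOfDivTrial]
    simp only [dif_pos hle, if_neg hmod]
    rw [ih (by omega)]
    constructor
    · rintro (h | ⟨h1, h2, h3⟩)
      · exact Or.inl h
      · exact Or.inr ⟨by omega, h2, h3⟩
    · rintro (h | ⟨h1, h2, h3⟩)
      · exact Or.inl h
      · refine Or.inr ⟨?_, h2, h3⟩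
        rcases eq_or_lt_of_le h1 with rfl | h
        · exact absurd h3 hm
        · omega
  | case4 d small large hle =>
    intro hd
    rw [dicOfDivTrial]
    simp only [dif_neg hle]
    constructor
    · exact Or.inl
    · rintro (h | ⟨h1, h2, h3⟩)
      · exact h
      · exact absurd h2 (by nlinarith)

lemma trial_snd_mem (i x : Int) : ∀ (d : Int) (small large : List Int), 2 ≤ d →
    (x ∈ (dicOfDivTrial i d small large).2 ↔ x ∈ large ∨
      (∃ d', d ≤ d' ∧ d' * d' ≤ i ∧ PySem.Int.mod i d' = 0 ∧
        x = PySem.Int.floordiv i d' ∧ x ≠ d')) := by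
  intro d small large
  induction d, small, large using dicOfDivTrial.induct (i := i) with
  | case1 d small large hle hmod q hq ih =>
    intro hd
    have hm : PySem.Int.mod i d = 0 := by simpa using hmod
    rw [dicOfDivTrial]
    simp only [dif_pos hle, hmod, if_true]
    rw [if_pos hq, ih (by omega)]
    simp only [List.mem_append, List.mem_singleton]
    constructor
    · rintro ((h | rfl) | ⟨d', h1, h2, h3, h4, h5⟩)
      · exact Or.inl h
      · exact Or.inr ⟨d, le_refl _, hle, hm, rfl, hq⟩
      · exact Or.inr ⟨d', by omega, h2, h3, h4, h5⟩
    · rintro (h | ⟨d', h1, h2, h3, h4, h5⟩)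
      · exact Or.inl (Or.inl h)
      · rcases eq_or_lt_of_le h1 with rfl | hlt
        · exact Or.inl (Or.inr h4)
        · exact Or.inr ⟨d', by omega, h2, h3, h4, h5⟩
  | case2 d small large hle hmod q hq ih =>
    intro hd
    have hm : PySem.Int.mod i d = 0 := by simpa using hmod
    have hqd : PySem.Int.floordiv i d = d := by simpa using hq
    rw [dicOfDivTrial]
    simp only [dif_pos hle, hmod, if_true]
    rw [if_neg hq, ih (by omega)]
    constructor
    · rintro (h | ⟨d', h1, h2, h3, h4, h5⟩)
      · exact Or.inl h
      · exact Or.inr ⟨d', by omega, h2, h3, h4, h5⟩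
    · rintro (h | ⟨d', h1, h2, h3, h4, h5⟩)
      · exact Or.inl h
      · rcases eq_or_lt_of_le h1 with rfl | hlt
        · exact absurd (h4.trans hqd) h5
        · exact Or.inr ⟨d', by omega, h2, h3, h4, h5⟩
  | case3 d small large hle hmod ih =>
    intro hd
    have hm : ¬ PySem.Int.mod i d = 0 := by simpa using hmod
    rw [dicOfDivTrial]
    simp only [dif_pos hle, if_neg hmod]
    rw [ih (by omega)]
    constructor
    · rintro (h | ⟨d', h1, h2, h3, h4, h5⟩)
      · exact Or.inl h
      · exact Or.inr ⟨d', by omega, h2, h3, h4, h5⟩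
    · rintro (h | ⟨d', h1, h2, h3, h4, h5⟩)
      · exact Or.inl h
      · rcases eq_or_lt_of_le h1 with rfl | hlt
        · exact absurd h3 hm
        · exact Or.inr ⟨d', by omega, h2, h3, h4, h5⟩
  | case4 d small large hle =>
    intro hd
    rw [dicOfDivTrial]
    simp only [dif_neg hle]
    constructor
    · exact Or.inl
    · rintro (h | ⟨d', h1, h2, h3, h4, h5⟩)
      · exact h
      · exact absurd h2 (by nlinarith)

lemma trial_pairwise (i : Int) : ∀ (d : Int) (small large : List Int), 2 ≤ d →
    small.Pairwise (· < ·) → (∀ s ∈ small, s < d) →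
    large.Pairwise (fun a b => b < a) → (∀ l ∈ large, i < l * d) →
    (dicOfDivTrial i d small large).1.Pairwise (· < ·) ∧
    (dicOfDivTrial i d small large).2.Pairwise (fun a b => b < a) := by
  intro d small large
  induction d, small, large using dicOfDivTrial.induct (i := i) with
  | case1 d small large hle hmod q hq ih =>
    intro hd hs hsd hl hld
    have hm : PySem.Int.mod i d = 0 := by simpa using hmod
    have hqd : q * d = i := by
      have h := PySem.Int.floordiv_mul_add_mod i d
      rw [hm] at h; simpa using h
    have hi : 4 ≤ i := by nlinarith
    have hq0 : 0 < q := by nlinarith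
    rw [dicOfDivTrial]
    simp only [dif_pos hle, hmod, if_true]
    rw [if_pos hq]
    refine ih (by omega) ?_ ?_ ?_ ?_
    · refine List.pairwise_append.2 ⟨hs, List.pairwise_singleton _ _, ?_⟩
      intro a ha b hb; rw [List.mem_singleton] at hb; subst hb; exact hsd a ha
    · intro s hsm
      rcases List.mem_append.1 hsm with h | h
      · have := hsd s h; omega
      · rw [List.mem_singleton] at h; omega
    · refine List.pairwise_append.2 ⟨hl, List.pairwise_singleton _ _, ?_⟩
      intro a ha b hb; rw [List.mem_singleton] at hb; subst hb
      have := hld a ha; nlinarith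
    · intro l hlm
      rcases List.mem_append.1 hlm with h | h
      · have h1 := hld l h
        have hl0 : 0 < l := by nlinarith
        nlinarith
      · rw [List.mem_singleton] at h; subst h; nlinarith
  | case2 d small large hle hmod q hq ih =>
    intro hd hs hsd hl hld
    have hi : 4 ≤ i := by nlinarith
    rw [dicOfDivTrial]
    simp only [dif_pos hle, hmod, if_true]
    rw [if_neg hq]
    refine ih (by omega) ?_ ?_ hl ?_
    · refine List.pairwise_append.2 ⟨hs, List.pairwise_singleton _ _, ?_⟩
      intro a ha b hb; rw [List.mem_singleton] at hb; subst hb; exact hsd a ha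
    · intro s hsm
      rcases List.mem_append.1 hsm with h | h
      · have := hsd s h; omega
      · rw [List.mem_singleton] at h; omega
    · intro l hlm
      have h1 := hld l hlm
      have hl0 : 0 < l := by nlinarith
      nlinarith
  | case3 d small large hle hmod ih =>
    intro hd hs hsd hl hld
    have hi : 4 ≤ i := by nlinarith
    rw [dicOfDivTrial]
    simp only [dif_pos hle, if_neg hmod]
    refine ih (by omega) hs ?_ hl ?_
    · intro s hsm; have := hsd s hsm; omega
    · intro l hlm
      have h1 := hld l hlm
      have hl0 : 0 < l := by nlinarith
      nlinarith
  | case4 d small large hle =>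
    intro hd hs hsd hl hld
    rw [dicOfDivTrial]
    simp only [dif_neg hle]
    exact ⟨hs, hl⟩

lemma fdiv_mul_of_mod_zero (i b : Int) (hm : PySem.Int.mod i b = 0) :
    PySem.Int.floordiv i b * b = i := by
  have h := PySem.Int.floordiv_mul_add_mod i b
  rw [hm] at h; simpa using h

-- which x the two divisor-collection strategies pick up: the same ones
lemma div_iff (i x : Int) :
    (2 ≤ x ∧ x ≤ PySem.Int.floordiv i 2 ∧ PySem.Int.mod i x = 0) ↔
    ((2 ≤ x ∧ x * x ≤ i ∧ PySem.Int.mod i x = 0) ∨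
     (∃ d', 2 ≤ d' ∧ d' * d' ≤ i ∧ PySem.Int.mod i d' = 0 ∧
       x = PySem.Int.floordiv i d' ∧ x ≠ d')) := by
  constructor
  · rintro ⟨h2, hle, hm⟩
    have hx0 : (0:Int) < x := by omega
    have h2x : x * 2 ≤ i := (PySem.Int.le_floordiv_iff_mul_le (by norm_num)).1 hle
    by_cases hxx : x * x ≤ i
    · exact Or.inl ⟨h2, hxx, hm⟩
    · push Not at hxx
      have hdx : PySem.Int.floordiv i x * x = i := fdiv_mul_of_mod_zero i x hm
      set d' := PySem.Int.floordiv i x with hd'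
      have hd'2 : 2 ≤ d' := by by_contra h; push Not at h; nlinarith
      have hd'x : d' < x := by by_contra h; push Not at h; nlinarith
      have hdd : d' * d' ≤ i := by nlinarith
      have hmd : PySem.Int.mod i d' = 0 :=
        (PySem.Int.mod_eq_zero_iff_dvd i d').2 ⟨x, by linarith [hdx]⟩
      have hxfd : x = PySem.Int.floordiv i d' := by
        have h2' : PySem.Int.floordiv i d' * d' = i := fdiv_mul_of_mod_zero i d' hmd
        have h3 : PySem.Int.floordiv i d' * d' = x * d' := by rw [h2']; nlinarith
        exact (mul_right_cancel₀ (by omega) h3).symm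
      exact Or.inr ⟨d', hd'2, hdd, hmd, hxfd, by omega⟩
  · rintro (⟨h2, hxx, hm⟩ | ⟨d', h2d, hdd, hmd, hxe, hxne⟩)
    · have hx0 : (0:Int) < x := by omega
      have hdx : PySem.Int.floordiv i x * x = i := fdiv_mul_of_mod_zero i x hm
      have hxk : x ≤ PySem.Int.floordiv i x := by by_contra h; push Not at h; nlinarith
      refine ⟨h2, (PySem.Int.le_floordiv_iff_mul_le (by norm_num)).2 (by nlinarith), hm⟩
    · have hd0 : (0:Int) < d' := by omega
      have hdx : PySem.Int.floordiv i d' * d' = i := fdiv_mul_of_mod_zero i d' hmd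
      have hxd : x * d' = i := by rw [hxe]; exact hdx
      have h2x : 2 ≤ x := by by_contra h; push Not at h; nlinarith
      refine ⟨h2x, (PySem.Int.le_floordiv_iff_mul_le (by norm_num)).2 (by nlinarith), ?_⟩
      exact (PySem.Int.mod_eq_zero_iff_dvd i x).2 ⟨d', by linarith [hxd]⟩

lemma divList_eq (i : Int) :
    divListA i = (dicOfDivTrial i 2 [] []).1 ++ (dicOfDivTrial i 2 [] []).2.reverse := by
  have hfst := fun x => trial_fst_mem i x 2 [] [] (le_refl 2)
  have hsnd := fun x => trial_snd_mem i x 2 [] [] (le_refl 2)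
  have hpw := trial_pairwise i 2 [] [] (le_refl 2) (List.Pairwise.nil) (by simp)
    (List.Pairwise.nil) (by simp)
  -- membership of the combined list
  have hmemB : ∀ x, x ∈ (dicOfDivTrial i 2 [] []).1 ++ (dicOfDivTrial i 2 [] []).2.reverse ↔
      (2 ≤ x ∧ x ≤ PySem.Int.floordiv i 2 ∧ PySem.Int.mod i x = 0) := by
    intro x
    rw [List.mem_append, List.mem_reverse, hfst x, hsnd x, div_iff]
    simp
  have hmemA : ∀ x, x ∈ divListA i ↔
      (2 ≤ x ∧ x ≤ PySem.Int.floordiv i 2 ∧ PySem.Int.mod i x = 0) := by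
    intro x
    unfold divListA
    rw [List.mem_filter, PySem.List.mem_pyRange_one]
    constructor
    · rintro ⟨⟨h1, h2⟩, h3⟩; exact ⟨h1, by omega, by simpa using h3⟩
    · rintro ⟨h1, h2, h3⟩; exact ⟨⟨h1, by omega⟩, by simpa using h3⟩
  -- the cross inequality: every small divisor is below every cofactor
  have hcross : ∀ a ∈ (dicOfDivTrial i 2 [] []).1, ∀ b ∈ (dicOfDivTrial i 2 [] []).2.reverse, a < b := by
    intro a ha b hb
    rw [hfst a] at ha
    rw [List.mem_reverse, hsnd b] at hb
    rcases ha with h | ⟨ha2, haa, ham⟩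
    · simp at h
    rcases hb with h | ⟨d', hd2, hdd, hdm, hbe, hbne⟩
    · simp at h
    have hbd : b * d' = i := by
      rw [hbe]; exact fdiv_mul_of_mod_zero i d' hdm
    have hb2 : 2 ≤ b := by by_contra h; push Not at h; nlinarith
    -- b * b > i ≥ a * a, all positive, so a < b
    have hbb : i < b * b := by
      rcases lt_or_ge d' b with h | h
      · nlinarith
      · have hbd' : b < d' := by omega
        nlinarith
    by_contra h; push Not at h; nlinarith
  -- both sides strictly increasing with the same members
  have hpwB : ((dicOfDivTrial i 2 [] []).1 ++ (dicOfDivTrial i 2 [] []).2.reverse).Pairwise (· < ·) :=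
    List.pairwise_append.2 ⟨hpw.1, List.pairwise_reverse.2 hpw.2, hcross⟩
  have hpwA : (divListA i).Pairwise (· < ·) :=
    List.Pairwise.filter _ (PySem.List.pairwise_lt_pyRange_one _ _)
  refine List.eq_of_perm_of_sorted (le := (· < ·)) (fun a b _ _ hab hba => absurd hba (by omega))
    hpwA hpwB ?_
  refine (List.perm_ext_iff_of_nodup ?_ ?_).2 (fun a => (hmemA a).trans (hmemB a).symm)
  · exact (hpwA.imp (fun h => by omega))
  · exact (hpwB.imp (fun h => by omega))

lemma innerA_eq' (i s c : Int) :
    (PySem.List.pyRange 2 (PySem.Int.floordiv i 2 + 1) 1).foldl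
      (fun (acc : Int × Int × List Int) j =>
        if PySem.Int.mod i j == 0 then (acc.1 + j, acc.2.1 + 1, acc.2.2 ++ [j]) else acc)
      (s, c, [])
    = (s + ((dicOfDivTrial i 2 [] []).1 ++ (dicOfDivTrial i 2 [] []).2.reverse).sum,
       c + (((dicOfDivTrial i 2 [] []).1 ++ (dicOfDivTrial i 2 [] []).2.reverse).length : Int),
       (dicOfDivTrial i 2 [] []).1 ++ (dicOfDivTrial i 2 [] []).2.reverse) := by
  rw [innerA_eq, ← divList_eq i]
  simp only [List.nil_append]
  rfl

lemma outer_eq (ls : List Int) : ∀ (s c : Int) (dic : PySem.Dict Int (List Int)),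
    (ls.foldl (fun (st : Int × Int × PySem.Dict Int (List Int)) i =>
      let inner := (PySem.List.pyRange 2 (PySem.Int.floordiv i 2 + 1) 1).foldl
        (fun (acc : Int × Int × List Int) j =>
          if PySem.Int.mod i j == 0 then (acc.1 + j, acc.2.1 + 1, acc.2.2 ++ [j]) else acc)
        (st.1, st.2.1, [])
      (inner.1, inner.2.1, st.2.2.insert i inner.2.2)) (s, c, dic))
    = (let b := ls.foldl (fun (st : PySem.Dict Int (List Int) × Int × Int) i =>
        let p := dicOfDivTrial i 2 [] []
        let lst := p.1 ++ p.2.reverse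
        (st.1.insert i lst, st.2.1 + lst.sum, st.2.2 + (lst.length : Int))) (dic, s, c)
       (b.2.1, b.2.2, b.1)) := by
  induction ls with
  | nil => intro s c dic; rfl
  | cons x t ih =>
    intro s c dic
    rw [List.foldl_cons, List.foldl_cons, innerA_eq', ih]

theorem dicOfDiv_spec : Claim_equal_dicOfDiv := by
  intro ls _
  unfold Spec_dicOfDiv dicOfDiv dicOfDiv_alt
  simp only [outer_eq ls 0 0 PySem.Dict.empty]
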